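-- pv_equiv track=rewrite | github.com/MatteoDeSantisS/Progetto-Vertex-Agiw | My_Library/.ipynb_checkpoints/metrics-checkpoint.py | pages_covered
-- ===== SOURCE A (Python) =====
-- def key_with_max_val(_dict):
--         values = list(_dict.values())
--         keys = list(_dict.keys())
--
--         return keys[values.index(max(values))]
--
-- def pages_covered(clusters, ground_truth):
--
--         truth_count = {}
--         pages_covered = []
--
--         for key in clusters.keys():
--             for truth_class in ground_truth:
--                 truth_count[truth_class] = 0
--
--             for page_name in clusters[key]:
--
--                 for truth_class in ground_truth:
--                     if truth_class in page_name:
--                         truth_count[truth_class] += 1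
--                         break
--
--             _class = key_with_max_val(truth_count)
--             pages_covered.append((key,_class,truth_count[_class],(len(clusters[key]))))
--
--         return pages_covered
-- ===== SOURCE B (Python) =====
-- def pages_covered(clusters, ground_truth):
--     result = []
--     for key, pages in clusters.items():
--         best_class, best_count = None, -1
--         remaining = list(pages)
--         for c in ground_truth:
--             kept = [p for p in remaining if c not in p]
--             n = len(remaining) - len(kept)
--             if n > best_count:
--                 best_class, best_count = c, n
--             remaining = kept
--         result.append((key, best_class, best_count, len(pages)))
--     return result
-- ===== Notes on version B (the rewrite author's own statement) =====
-- stated objective: alternative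
-- what changed: Replaces A's page-major strategy (classify every page into a dict of per-class counters, then argmax via the keys/values.index helper) with a class-major sieve: keep a pool of remaining pages and, for each ground-truth class in order, split off the pages containing it (n = len(remaining) - len(kept)), update a running (best_class, best_count) on strict improvement (preserving A's first-class tie-break), and continue with the kept pool so later classes only see pages they are the first match of; no dict and no argmax pass.
import Mathlib
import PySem

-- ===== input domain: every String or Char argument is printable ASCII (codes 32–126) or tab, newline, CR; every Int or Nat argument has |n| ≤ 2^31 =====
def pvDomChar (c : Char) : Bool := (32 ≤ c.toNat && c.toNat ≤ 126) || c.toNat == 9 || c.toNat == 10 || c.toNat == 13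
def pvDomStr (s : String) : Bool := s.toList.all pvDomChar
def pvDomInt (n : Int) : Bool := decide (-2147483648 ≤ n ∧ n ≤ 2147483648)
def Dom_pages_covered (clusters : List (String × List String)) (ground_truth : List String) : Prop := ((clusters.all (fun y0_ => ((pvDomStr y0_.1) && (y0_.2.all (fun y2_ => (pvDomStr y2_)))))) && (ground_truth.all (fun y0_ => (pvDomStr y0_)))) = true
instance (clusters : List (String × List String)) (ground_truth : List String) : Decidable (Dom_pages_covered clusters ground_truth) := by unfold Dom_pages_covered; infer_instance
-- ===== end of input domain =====

-- B replaces A's page-major dict counting + keys/values.index argmax helper with a class-major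
-- sieve over a shrinking page pool and a running best (alternative decomposition; same cost).


-- ===== PORT A =====
-- keys[values.index(max(values))]; max([]) raises ValueError (those inputs are excluded by Pre_,
-- so the .getD "" fallback is never reached on admitted inputs).
def key_with_max_val (d : PySem.Dict String Int) : String :=
  let values := d.values
  let keys := d.keys
  ((PySem.List.max? values (fun v => v)).bind (fun m =>
    (PySem.List.index? values m).bind (fun i =>
      PySem.List.pyGet? keys (i : Int)))).getD ""

-- clusters is a Python dict: iterated via PySem.Dict (keys / lookup).
-- The inner 'for truth_class in ground_truth: if …: …; break' is List.find? + Option.elim;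
-- 'truth_count[truth_class] += 1' is Dict.modify (exact: the key was inserted by the reset loop).
def pages_covered (clusters : List (String × List String)) (ground_truth : List String) : List (String × String × Int × Int) :=
  let cd := PySem.Dict.ofList clusters
  (cd.keys.foldl (fun (st : PySem.Dict String Int × List (String × String × Int × Int)) key =>
      let tc0 := ground_truth.foldl (fun d truth_class => d.insert truth_class 0) st.1
      let tc := (cd.getD key []).foldl (fun d page_name =>
          (ground_truth.find? (fun truth_class => PySem.Str.isIn truth_class page_name)).elim d
            (fun truth_class => d.modify truth_class 0 (· + 1))) tc0
      let cls := key_with_max_val tc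
      (tc, st.2 ++ [(key, cls, tc.getD cls 0, ((cd.getD key []).length : Int))]))
    (PySem.Dict.empty, [])).2

-- ===== PORT B =====
-- Class-major sieve: state is (best_class, best_count, remaining); the pool update
-- '[p for p in remaining if c not in p]' is List.filter, n = len(remaining) - len(kept).
-- best_class is Python's None only when ground_truth = [] (then A raises: excluded by Pre_),
-- so the .getD "" there is unreached on admitted inputs.
def pages_covered_alt (clusters : List (String × List String)) (ground_truth : List String) : List (String × String × Int × Int) :=
  (PySem.Dict.ofList clusters).items.foldl (fun out kv =>
    let pages := kv.2
    let fin := ground_truth.foldl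
      (fun (st : Option String × Int × List String) c =>
        let kept := st.2.2.filter (fun p => !PySem.Str.isIn c p)
        let n : Int := (st.2.2.length : Int) - (kept.length : Int)
        let best : Option String × Int := if n > st.2.1 then (some c, n) else (st.1, st.2.1)
        (best.1, best.2, kept))
      (none, -1, pages)
    out ++ [(kv.1, fin.1.getD "", fin.2.1, (pages.length : Int))]) []

-- ===== PRECONDITION & SPEC =====
-- Pre_ excludes exactly the inputs where A raises ValueError (max() of an empty sequence):
-- a non-empty clusters dict together with an empty ground_truth list.
def Pre_pages_covered (clusters : List (String × List String)) (ground_truth : List String) : Prop :=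
  clusters = [] ∨ ground_truth ≠ []
instance (clusters : List (String × List String)) (ground_truth : List String) : Decidable (Pre_pages_covered clusters ground_truth) := by unfold Pre_pages_covered; infer_instance

def pvWitness_pages_covered : (List (String × List String)) × List String :=
  ([("k1", ["page a x", "b page", "zz"]), ("k2", [])], ["a", "b"])

def Spec_pages_covered (clusters : List (String × List String)) (ground_truth : List String) (out : List (String × String × Int × Int)) : Prop := out = pages_covered_alt clusters ground_truth
instance (clusters : List (String × List String)) (ground_truth : List String) (out : List (String × String × Int × Int)) : Decidable (Spec_pages_covered clusters ground_truth out) := by unfold Spec_pages_covered; infer_instance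

-- ===== CLAIM (what is proved, stated in full; the proofs are below) =====
def Claim_equal_pages_covered : Prop := ∀ (clusters : List (String × List String)) (ground_truth : List String), Dom_pages_covered clusters ground_truth → Pre_pages_covered clusters ground_truth → Spec_pages_covered clusters ground_truth (pages_covered clusters ground_truth)

-- ===== LEMMAS AND PROOFS =====

def pick {α : Type} (f : α → Int) (b x : α) : α := if f b < f x then x else b

lemma max?_cons_foldl {α : Type} (f : α → Int) (a : α) (t : List α) :
    PySem.List.max? (a :: t) f = some (t.foldl (pick f) a) := by
  simp only [PySem.List.max?, List.foldl_cons]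
  induction t generalizing a with
  | nil => rfl
  | cons x t ih =>
    simp only [List.foldl_cons, pick]
    split <;> exact ih _

lemma foldl_pick_eq (f : String → Int) (t : List String) (b r : String)
    (h : PySem.List.max? t f = some r) :
    t.foldl (pick f) b = if f b < f r then r else b := by
  induction t generalizing b r with
  | nil => simp [PySem.List.max?] at h
  | cons x t ih =>
    rw [max?_cons_foldl] at h
    cases ht : PySem.List.max? t f with
    | none =>
      have : t = [] := by
        cases t with
        | nil => rfl
        | cons y u => rw [max?_cons_foldl] at ht; simp at ht
      subst this
      simp only [List.foldl_cons, List.foldl_nil] at h ⊢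
      simp only [Option.some.injEq] at h
      subst h; rfl
    | some r' =>
      have h1 : t.foldl (pick f) x = if f x < f r' then r' else x := ih x r' ht
      rw [h1] at h
      simp only [Option.some.injEq] at h
      have h2 : t.foldl (pick f) (pick f b x) = if f (pick f b x) < f r' then r' else pick f b x := ih _ r' ht
      simp only [List.foldl_cons]
      rw [h2]
      unfold pick at *
      split_ifs at h ⊢ <;> subst h <;> first | rfl | omega

lemma foldl_pick_map (f : String → Int) (t : List String) : ∀ a : String,
    (t.map f).foldl (pick (fun v => v)) (f a) = f (t.foldl (pick f) a) := by
  induction t with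
  | nil => intro a; rfl
  | cons x t ih =>
    intro a
    simp only [List.map_cons, List.foldl_cons, pick]
    by_cases hlt : f a < f x
    · simp only [if_pos hlt]; exact ih x
    · simp only [if_neg hlt]; exact ih a

lemma map_max? (f : String → Int) (xs : List String) :
    PySem.List.max? (xs.map f) (fun v => v) = (PySem.List.max? xs f).map f := by
  cases xs with
  | nil => rfl
  | cons a t =>
    rw [List.map_cons, max?_cons_foldl, max?_cons_foldl, Option.map_some]
    exact congrArg some (foldl_pick_map f t a)

lemma max?_first (f : String → Int) (xs : List String) (r : String)
    (h : PySem.List.max? xs f = some r) :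
    ∃ i, ∃ hi : i < xs.length, xs[i] = r ∧ ∀ j (_ : j < i), f xs[j] < f r := by
  induction xs generalizing r with
  | nil => simp [PySem.List.max?] at h
  | cons x t ih =>
    rw [max?_cons_foldl] at h
    simp only [Option.some.injEq] at h
    cases ht : PySem.List.max? t f with
    | none =>
      have : t = [] := by
        cases t with
        | nil => rfl
        | cons y u => rw [max?_cons_foldl] at ht; simp at ht
      subst this
      simp only [List.foldl_nil] at h
      exact ⟨0, by simp, by simp [h], by omega⟩
    | some r' =>
      rw [foldl_pick_eq f t x r' ht] at h
      by_cases hx : f x < f r'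
      · rw [if_pos hx] at h
        obtain ⟨i, hi, hxi, hlt⟩ := ih r' ht
        subst h
        refine ⟨i + 1, by simpa using Nat.succ_lt_succ hi, by simpa using hxi, ?_⟩
        intro j hj
        cases j with
        | zero => simpa using hx
        | succ j => simpa using hlt j (by omega)
      · rw [if_neg hx] at h
        subst h
        exact ⟨0, by simp, by simp, by omega⟩

lemma kwmv_eq (f : String → Int) (ks : List String) (hne : ks ≠ []) :
    ((PySem.List.max? (ks.map f) (fun v => v)).bind (fun m =>
      (PySem.List.index? (ks.map f) m).bind (fun i =>
        PySem.List.pyGet? ks (i : Int)))).getD "" = (PySem.List.max? ks f).getD "" := by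
  obtain ⟨r, hr⟩ : ∃ r, PySem.List.max? ks f = some r := by
    cases ks with
    | nil => exact absurd rfl hne
    | cons a t => exact ⟨_, max?_cons_foldl f a t⟩
  obtain ⟨i, hi, hxi, hlt⟩ := max?_first f ks r hr
  have hidx : PySem.List.index? (ks.map f) (f r) = some i := by
    simp only [PySem.List.index?]
    rw [List.idxOf?_eq_some_iff]
    refine ⟨by simpa using hi, by simp [hxi], ?_⟩
    intro j hj
    simp only [List.getElem_map]
    exact Int.ne_of_lt (hlt j hj)
  rw [map_max?, hr]
  simp only [Option.map_some, Option.bind_some, hidx, Option.bind_some,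
    PySem.List.pyGet?_natCast]
  simp [List.getElem?_eq_getElem hi, hxi]

lemma update_prefix (t : List String) : ∀ s : PySem.Set String,
    ∃ r, PySem.Set.update s t = s ++ r := by
  induction t with
  | nil => intro s; exact ⟨[], by simp [PySem.Set.update]⟩
  | cons x t ih =>
    intro s
    have hstep : PySem.Set.update s (x :: t) = PySem.Set.update (PySem.Set.add s x) t := rfl
    by_cases hx : PySem.Set.contains s x = true
    · have : PySem.Set.add s x = s := by unfold PySem.Set.add; rw [if_pos hx]
      obtain ⟨r, hr⟩ := ih s
      exact ⟨r, by rw [hstep, this, hr]⟩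
    · have : PySem.Set.add s x = s ++ [x] := by unfold PySem.Set.add; rw [if_neg hx]
      obtain ⟨r, hr⟩ := ih (s ++ [x])
      exact ⟨x :: r, by rw [hstep, this, hr]; simp⟩

-- congruence for Python max with key
lemma foldl_pick_congr (f g : String → Int) (t : List String) : ∀ a : String,
    f a = g a → (∀ x ∈ t, f x = g x) → t.foldl (pick f) a = t.foldl (pick g) a := by
  induction t with
  | nil => intro a _ _; rfl
  | cons x t ih =>
    intro a ha hx
    have hxx : f x = g x := hx x List.mem_cons_self
    have hpick : pick f a x = pick g a x := by simp [pick, ha, hxx]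
    have hmem : f (pick g a x) = g (pick g a x) := by
      simp only [pick]; split
      · exact hxx
      · exact ha
    simp only [List.foldl_cons, hpick]
    exact ih _ hmem (fun y hy => hx y (List.mem_cons_of_mem _ hy))

lemma max?_congr (f g : String → Int) (xs : List String) (h : ∀ x ∈ xs, f x = g x) :
    PySem.List.max? xs f = PySem.List.max? xs g := by
  cases xs with
  | nil => rfl
  | cons a t =>
    rw [max?_cons_foldl, max?_cons_foldl]
    exact congrArg some (foldl_pick_congr f g t a (h a List.mem_cons_self)
      (fun y hy => h y (List.mem_cons_of_mem _ hy)))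

lemma update_subset (l : List String) : ∀ s : PySem.Set String, (∀ x ∈ l, x ∈ s) →
    PySem.Set.update s l = s := by
  induction l with
  | nil => intro s _; rfl
  | cons x l ih =>
    intro s hsub
    have hc : PySem.Set.contains s x = true := by
      simpa [PySem.Set.contains, List.contains_iff_mem] using hsub x List.mem_cons_self
    have hadd : PySem.Set.add s x = s := by unfold PySem.Set.add; rw [if_pos hc]
    have hstep : PySem.Set.update s (x :: l) = PySem.Set.update (PySem.Set.add s x) l := rfl
    rw [hstep, hadd]
    exact ih s (fun y hy => hsub y (List.mem_cons_of_mem _ hy))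

lemma getD_init (gt : List String) (c : String) : ∀ d : PySem.Dict String Int,
    (gt.foldl (fun d tc => d.insert tc 0) d).getD c 0
      = if c ∈ gt then 0 else d.getD c 0 := by
  induction gt with
  | nil => intro d; simp
  | cons a t ih =>
    intro d
    simp only [List.foldl_cons]
    rw [ih (d.insert a 0), PySem.Dict.getD_insert]
    by_cases hct : c ∈ t
    · simp [hct]
    · by_cases hca : c = a
      · simp [hca]
      · simp [hct, hca]

-- the tag of a page: its first matching ground-truth class
def tagf (gt : List String) (p : String) : Option String :=
  gt.find? (fun c => PySem.Str.isIn c p)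

-- B's per-cluster count of pages whose first ground-truth match is c
def fB (gt : List String) (pages : List String) (c : String) : Int :=
  ((pages.filterMap (tagf gt)).count c : Int)

lemma countA_getD (gt : List String) (pages : List String) (d : PySem.Dict String Int) (c : String) :
    (pages.foldl (fun d page =>
        (gt.find? (fun tc => PySem.Str.isIn tc page)).elim d (fun tc => d.modify tc 0 (· + 1))) d).getD c 0
      = d.getD c 0 + ((pages.filterMap (tagf gt)).count c : Int) := by
  have hb : (pages.foldl (fun d page =>
        (gt.find? (fun tc => PySem.Str.isIn tc page)).elim d (fun tc => d.modify tc 0 (· + 1))) d)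
      = (pages.filterMap (tagf gt)).foldl (fun d tc => d.modify tc 0 (· + 1)) d := by
    rw [List.foldl_filterMap]
    congr 1
    funext acc page
    unfold tagf
    cases List.find? (fun tc => PySem.Str.isIn tc page) gt <;> rfl
  rw [hb]
  exact PySem.Dict.getD_foldl_modify_add_one _ d c

lemma countA_keys (gt : List String) (pages : List String) (d : PySem.Dict String Int) :
    (pages.foldl (fun d page =>
        (gt.find? (fun tc => PySem.Str.isIn tc page)).elim d (fun tc => d.modify tc 0 (· + 1))) d).keys
      = PySem.Set.update d.keys (pages.filterMap (tagf gt)) := by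
  have hb : (pages.foldl (fun d page =>
        (gt.find? (fun tc => PySem.Str.isIn tc page)).elim d (fun tc => d.modify tc 0 (· + 1))) d)
      = (pages.filterMap (tagf gt)).foldl (fun d tc => d.modify tc 0 (· + 1)) d := by
    rw [List.foldl_filterMap]
    congr 1
    funext acc page
    unfold tagf
    cases List.find? (fun tc => PySem.Str.isIn tc page) gt <;> rfl
  rw [hb]
  exact PySem.Dict.keys_foldl_modify _ 0 (fun _ _ => (· + 1)) d

lemma tags_subset (gt pages : List String) :
    ∀ c ∈ pages.filterMap (tagf gt), c ∈ gt := by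
  intro c hc
  obtain ⟨p, _, hp⟩ := List.mem_filterMap.mp hc
  exact List.mem_of_find?_eq_some hp

lemma ofList_ne_nil (gt : List String) (h : gt ≠ []) : PySem.Set.ofList gt ≠ [] := by
  cases gt with
  | nil => exact absurd rfl h
  | cons a t =>
    intro hempty
    have : a ∈ PySem.Set.ofList (a :: t) := (PySem.Set.mem_ofList _ _).mpr List.mem_cons_self
    rw [hempty] at this
    exact List.not_mem_nil this

-- ========== B-side lemmas: the sieve scan ==========

-- pages with no match among the already-processed classes
def noMB (s : List String) (p : String) : Bool := s.all (fun e => !PySem.Str.isIn e p)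

-- B's inner-loop step (syntactically the lambda in pages_covered_alt)
def bstep (st : Option String × Int × List String) (c : String) : Option String × Int × List String :=
  let kept := st.2.2.filter (fun p => !PySem.Str.isIn c p)
  let n : Int := (st.2.2.length : Int) - (kept.length : Int)
  let best : Option String × Int := if n > st.2.1 then (some c, n) else (st.1, st.2.1)
  (best.1, best.2, kept)

lemma len_sub_filter (q : String → Bool) (l : List String) :
    (l.length : Int) - ((l.filter (fun p => !q p)).length : Int) = (l.countP q : Int) := by
  induction l with
  | nil => rfl
  | cons x t ih =>
    by_cases h : q x = true <;>
      simp only [List.filter_cons, List.countP_cons, List.length_cons, h, Bool.not_true,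
        Bool.not_false, if_true, if_false, List.length_cons] <;>
      push_cast <;> omega

lemma count_filterMap_tag (gt : List String) (c : String) (l : List String) :
    (l.filterMap (tagf gt)).count c = l.countP (fun p => tagf gt p == some c) := by
  induction l with
  | nil => rfl
  | cons x t ih =>
    simp only [List.filterMap_cons, List.countP_cons]
    cases h : tagf gt x with
    | none => simp [h, ih]
    | some v => simp [List.count_cons, h, ih, BEq.comm]

lemma cond_eq_tag (s : List String) (c : String) (t' : List String) (hc : c ∉ s) (p : String) :
    (noMB s p && PySem.Str.isIn c p) = (tagf (s ++ c :: t') p == some c) := by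
  unfold noMB tagf
  rw [List.find?_append]
  cases hfs : List.find? (fun e => PySem.Str.isIn e p) s with
  | some e =>
    have he : e ∈ s := List.mem_of_find?_eq_some hfs
    have hep0 := List.find?_some hfs
    have hep : PySem.Str.isIn e p = true := hep0
    have hec : e ≠ c := fun h => hc (h ▸ he)
    have hall : s.all (fun e => !PySem.Str.isIn e p) = false := by
      rw [List.all_eq_false]
      exact ⟨e, he, by rw [hep]; simp⟩
    rw [hall, Bool.false_and]
    rw [show Option.or (some e) (List.find? (fun e => PySem.Str.isIn e p) (c :: t')) = some e from rfl]
    symm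
    rw [beq_eq_false_iff_ne]
    exact fun h => hec (by injection h)
  | none =>
    have hall : s.all (fun e => !PySem.Str.isIn e p) = true := by
      rw [List.all_eq_true]
      intro e hes
      have hne := List.find?_eq_none.mp hfs e hes
      rw [Bool.not_eq_true']
      exact Bool.eq_false_iff.mpr hne
    rw [hall, Bool.true_and]
    rw [show Option.or (none : Option String) (List.find? (fun e => PySem.Str.isIn e p) (c :: t'))
        = List.find? (fun e => PySem.Str.isIn e p) (c :: t') from rfl]
    rw [List.find?_cons]
    by_cases hcp : PySem.Str.isIn c p = true
    · rw [hcp]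
      simp
    · rw [Bool.eq_false_iff.mpr hcp]
      cases hft : List.find? (fun e => PySem.Str.isIn e p) t' with
      | none => rfl
      | some v =>
        have hvp0 := List.find?_some hft
        have hvp : PySem.Str.isIn v p = true := hvp0
        have hvc : v ≠ c := fun h => hcp (h ▸ hvp)
        symm
        rw [beq_eq_false_iff_ne]
        exact fun h => hvc (by injection h)

lemma count_fresh (gt : List String) (pages : List String) (s : List String) (c : String)
    (t' : List String) (hc : c ∉ s) (hg : gt = s ++ c :: t') :
    ((pages.filter (noMB s)).countP (fun p => PySem.Str.isIn c p) : Int) = fB gt pages c := by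
  unfold fB
  rw [count_filterMap_tag]
  congr 1
  rw [List.countP_filter]
  apply List.countP_congr
  intro p _
  rw [hg]
  rw [← cond_eq_tag s c t' hc p]
  rw [Bool.and_comm]

lemma count_dup_zero (s : List String) (c : String) (hc : c ∈ s) (l : List String) :
    (l.filter (noMB s)).countP (fun p => PySem.Str.isIn c p) = 0 := by
  rw [List.countP_eq_zero]
  intro p hp
  have h1 : noMB s p = true := List.of_mem_filter hp
  have h2 := (List.all_eq_true.mp h1) c hc
  simpa using h2

lemma filter_step (s : List String) (c : String) (l : List String) :
    (l.filter (noMB s)).filter (fun p => !PySem.Str.isIn c p) = l.filter (noMB (s ++ [c])) := by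
  rw [List.filter_filter]
  apply List.filter_congr
  intro p _
  simp [noMB, List.all_append, Bool.and_comm]

lemma fB_nonneg (gt pages : List String) (c : String) : 0 ≤ fB gt pages c := by
  unfold fB; exact Int.ofNat_nonneg _

lemma bscan (gt pages : List String) :
    ∀ (t s : List String) (s' : PySem.Set String) (b : String),
    (∀ x, x ∈ s ↔ x ∈ s') → gt = s ++ t →
    t.foldl bstep (some b, fB gt pages b, pages.filter (noMB s))
      = (some (((PySem.Set.update s' t).drop s'.length).foldl (pick (fB gt pages)) b),
         fB gt pages (((PySem.Set.update s' t).drop s'.length).foldl (pick (fB gt pages)) b),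
         pages.filter (noMB (s ++ t))) := by
  intro t
  induction t with
  | nil =>
    intro s s' b _ _
    simp [PySem.Set.update, List.drop_length]
  | cons c t' ih =>
    intro s s' b hmem hg
    have hn : ((pages.filter (noMB s)).length : Int)
          - (((pages.filter (noMB s)).filter (fun p => !PySem.Str.isIn c p)).length : Int)
        = ((pages.filter (noMB s)).countP (fun p => PySem.Str.isIn c p) : Int) :=
      len_sub_filter _ _
    by_cases hc : c ∈ s
    · -- duplicate class: counts 0, never beats the running best (≥ 0)
      have hz : ((pages.filter (noMB s)).countP (fun p => PySem.Str.isIn c p) : Int) = 0 := by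
        rw [count_dup_zero s c hc]; rfl
      have hb : bstep (some b, fB gt pages b, pages.filter (noMB s)) c
          = (some b, fB gt pages b, pages.filter (noMB (s ++ [c]))) := by
        unfold bstep
        simp only [hn, hz]
        rw [if_neg (by have := fB_nonneg gt pages b; omega)]
        rw [filter_step]
      have hc' : c ∈ s' := (hmem c).mp hc
      have hcc : PySem.Set.contains s' c = true := by
        simpa [PySem.Set.contains, List.contains_iff_mem] using hc'
      have hu : PySem.Set.update s' (c :: t') = PySem.Set.update s' t' := by
        show PySem.Set.update (PySem.Set.add s' c) t' = _
        unfold PySem.Set.add; rw [if_pos hcc]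
      have hmem' : ∀ x, x ∈ s ++ [c] ↔ x ∈ s' := by
        intro x
        constructor
        · intro hx
          rcases List.mem_append.mp hx with h | h
          · exact (hmem x).mp h
          · simp at h; subst h; exact hc'
        · intro hx; exact List.mem_append.mpr (Or.inl ((hmem x).mpr hx))
      have hg' : gt = (s ++ [c]) ++ t' := by rw [hg]; simp
      calc (c :: t').foldl bstep (some b, fB gt pages b, pages.filter (noMB s))
          = t'.foldl bstep (some b, fB gt pages b, pages.filter (noMB (s ++ [c]))) := by
            rw [List.foldl_cons, hb]
        _ = _ := by
            rw [ih (s ++ [c]) s' b hmem' hg', hu]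
            rw [show (s ++ [c]) ++ t' = s ++ c :: t' by simp]
    · -- fresh class: counts fB c, strict-improve update = pick
      have hcnt : ((pages.filter (noMB s)).countP (fun p => PySem.Str.isIn c p) : Int)
          = fB gt pages c := count_fresh gt pages s c t' hc hg
      have hb : bstep (some b, fB gt pages b, pages.filter (noMB s)) c
          = (some (pick (fB gt pages) b c), fB gt pages (pick (fB gt pages) b c),
             pages.filter (noMB (s ++ [c]))) := by
        unfold bstep
        simp only [hn, hcnt]
        rw [filter_step]
        unfold pick
        by_cases hlt : fB gt pages b < fB gt pages c
        · rw [if_pos (by omega), if_pos hlt]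
        · rw [if_neg (by omega), if_neg hlt]
      have hc' : c ∉ s' := fun h => hc ((hmem c).mpr h)
      have hcc : ¬ PySem.Set.contains s' c = true := by
        simpa [PySem.Set.contains, List.contains_iff_mem] using hc'
      have hu : PySem.Set.update s' (c :: t') = PySem.Set.update (s' ++ [c]) t' := by
        show PySem.Set.update (PySem.Set.add s' c) t' = _
        unfold PySem.Set.add; rw [if_neg hcc]
      obtain ⟨q, hq⟩ := update_prefix t' (s' ++ [c])
      have hdropc : (PySem.Set.update s' (c :: t')).drop s'.length = c :: q := by
        rw [hu, hq, List.append_assoc, List.drop_left]; rfl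
      have hdropq : (PySem.Set.update (s' ++ [c]) t').drop (s' ++ [c]).length = q := by
        rw [hq, List.drop_left]
      have hmem' : ∀ x, x ∈ s ++ [c] ↔ x ∈ s' ++ [c] := by
        intro x
        simp only [List.mem_append, List.mem_singleton]
        constructor
        · rintro (h | h)
          · exact Or.inl ((hmem x).mp h)
          · exact Or.inr h
        · rintro (h | h)
          · exact Or.inl ((hmem x).mpr h)
          · exact Or.inr h
      have hg' : gt = (s ++ [c]) ++ t' := by rw [hg]; simp
      calc (c :: t').foldl bstep (some b, fB gt pages b, pages.filter (noMB s))
          = t'.foldl bstep (some (pick (fB gt pages) b c), fB gt pages (pick (fB gt pages) b c),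
              pages.filter (noMB (s ++ [c]))) := by rw [List.foldl_cons, hb]
        _ = _ := by
            rw [ih (s ++ [c]) (s' ++ [c]) (pick (fB gt pages) b c) hmem' hg']
            rw [hdropq, hdropc]
            rw [show (s ++ [c]) ++ t' = s ++ c :: t' by simp, List.foldl_cons]

lemma bscan_top (gt pages : List String) (hgt : gt ≠ []) :
    ∃ r, PySem.List.max? (PySem.Set.ofList gt) (fB gt pages) = some r ∧
      gt.foldl bstep (none, -1, pages) = (some r, fB gt pages r, pages.filter (noMB gt)) := by
  cases gt with
  | nil => exact absurd rfl hgt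
  | cons g0 rest =>
    set gt := g0 :: rest with hgt'
    have hfil0 : pages.filter (noMB []) = pages := by
      apply List.filter_eq_self.mpr
      intro p _; rfl
    have hn0 : (pages.length : Int) - ((pages.filter (fun p => !PySem.Str.isIn g0 p)).length : Int)
        = fB gt pages g0 := by
      rw [len_sub_filter]
      rw [show (pages.countP (fun p => PySem.Str.isIn g0 p) : Int)
          = ((pages.filter (noMB [])).countP (fun p => PySem.Str.isIn g0 p) : Int) by
        rw [hfil0]]
      exact count_fresh gt pages [] g0 rest (by simp) rfl
    have hfg : pages.filter (fun p => !PySem.Str.isIn g0 p) = pages.filter (noMB [g0]) := by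
      apply List.filter_congr
      intro p _
      simp [noMB]
    have hb0 : bstep (none, -1, pages) g0 = (some g0, fB gt pages g0, pages.filter (noMB [g0])) := by
      unfold bstep
      simp only [hn0]
      rw [if_pos (by have := fB_nonneg gt pages g0; omega)]
      rw [hfg]
    have hscan := bscan gt pages rest [g0] [g0] g0 (fun x => Iff.rfl) rfl
    have hofl : PySem.Set.ofList gt = PySem.Set.update [g0] rest := rfl
    obtain ⟨q, hq⟩ := update_prefix rest ([g0] : PySem.Set String)
    have hdrop : (PySem.Set.update ([g0] : PySem.Set String) rest).drop ([g0] : PySem.Set String).length = q := by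
      rw [hq]; simp
    have hcons : PySem.Set.update ([g0] : PySem.Set String) rest = g0 :: q := by
      rw [hq]; rfl
    refine ⟨q.foldl (pick (fB gt pages)) g0, ?_, ?_⟩
    · rw [hofl, hcons, max?_cons_foldl]
    · show rest.foldl bstep (bstep (none, -1, pages) g0) = _
      rw [hb0, hscan, hdrop]
      rfl

lemma cluster_step (gt : List String) (hgt : gt ≠ []) (d : PySem.Dict String Int)
    (hK : PySem.Set.update d.keys gt = PySem.Set.ofList gt) (pages : List String) :
    (key_with_max_val ((pages.foldl (fun d page =>
          (gt.find? (fun tc => PySem.Str.isIn tc page)).elim d (fun tc => d.modify tc 0 (· + 1)))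
          (gt.foldl (fun d tc => d.insert tc 0) d)))
        = (gt.foldl bstep (none, -1, pages)).1.getD "")
    ∧ ((pages.foldl (fun d page =>
          (gt.find? (fun tc => PySem.Str.isIn tc page)).elim d (fun tc => d.modify tc 0 (· + 1)))
          (gt.foldl (fun d tc => d.insert tc 0) d)).getD
        (key_with_max_val ((pages.foldl (fun d page =>
          (gt.find? (fun tc => PySem.Str.isIn tc page)).elim d (fun tc => d.modify tc 0 (· + 1)))
          (gt.foldl (fun d tc => d.insert tc 0) d)))) 0
        = (gt.foldl bstep (none, -1, pages)).2.1)
    ∧ PySem.Set.update ((pages.foldl (fun d page =>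
          (gt.find? (fun tc => PySem.Str.isIn tc page)).elim d (fun tc => d.modify tc 0 (· + 1)))
          (gt.foldl (fun d tc => d.insert tc 0) d)).keys) gt
        = PySem.Set.ofList gt := by
  set tc0 := gt.foldl (fun d tc => d.insert tc 0) d with htc0
  set tc := pages.foldl (fun d page =>
      (gt.find? (fun tc => PySem.Str.isIn tc page)).elim d (fun tc => d.modify tc 0 (· + 1))) tc0 with htc
  have hA : ∀ c ∈ gt, tc.getD c 0 = fB gt pages c := by
    intro c hc
    rw [htc, countA_getD, htc0, getD_init, if_pos hc]
    unfold fB; ring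
  have hkeys0 : tc0.keys = PySem.Set.ofList gt := by
    rw [htc0, PySem.Dict.keys_foldl_insert, hK]
  have hsub : ∀ x ∈ pages.filterMap (tagf gt), x ∈ PySem.Set.ofList gt := by
    intro x hx
    exact (PySem.Set.mem_ofList _ _).mpr (tags_subset gt pages x hx)
  have hkeys : tc.keys = PySem.Set.ofList gt := by
    rw [htc, countA_keys, hkeys0, update_subset _ _ hsub]
  have hnodup : tc.keys.Nodup := by rw [hkeys]; exact PySem.Set.nodup_ofList gt
  have hne : tc.keys ≠ [] := by rw [hkeys]; exact ofList_ne_nil gt hgt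
  obtain ⟨r, hmax, hrun⟩ := bscan_top gt pages hgt
  have hf : ∀ k ∈ tc.keys, tc.getD k 0 = fB gt pages k := by
    intro k hk
    exact hA k ((PySem.Set.mem_ofList _ _).mp (hkeys ▸ hk))
  have hsel : key_with_max_val tc = (PySem.List.max? (PySem.Set.ofList gt) (fB gt pages)).getD "" := by
    unfold key_with_max_val
    rw [PySem.Dict.values_eq_map_keys tc hnodup 0]
    rw [kwmv_eq (fun k => tc.getD k 0) tc.keys hne]
    rw [max?_congr _ (fB gt pages) tc.keys hf, hkeys]
  have hrgt : r ∈ gt := (PySem.Set.mem_ofList _ _).mp (PySem.List.max?_mem hmax)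
  refine ⟨?_, ?_, by rw [hkeys]; exact update_subset _ _ (fun x hx => (PySem.Set.mem_ofList _ _).mpr hx)⟩
  · rw [hsel, hmax, hrun]
  · rw [hsel, hmax]
    simp only [Option.getD_some]
    rw [hA r hrgt, hrun]

lemma loop_eq (gt : List String) (hgt : gt ≠ []) (cd : PySem.Dict String (List String)) :
    ∀ (ks : List String) (d : PySem.Dict String Int)
      (out : List (String × String × Int × Int)),
    PySem.Set.update d.keys gt = PySem.Set.ofList gt →
    (ks.foldl (fun (st : PySem.Dict String Int × List (String × String × Int × Int)) key =>
        let tc0 := gt.foldl (fun d truth_class => d.insert truth_class 0) st.1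
        let tc := (cd.getD key []).foldl (fun d page_name =>
            (gt.find? (fun truth_class => PySem.Str.isIn truth_class page_name)).elim d
              (fun truth_class => d.modify truth_class 0 (· + 1))) tc0
        let cls := key_with_max_val tc
        (tc, st.2 ++ [(key, cls, tc.getD cls 0, ((cd.getD key []).length : Int))]))
      (d, out)).2
    = out ++ ks.map (fun key =>
        (key,
         (gt.foldl bstep (none, -1, cd.getD key [])).1.getD "",
         (gt.foldl bstep (none, -1, cd.getD key [])).2.1,
         ((cd.getD key []).length : Int))) := by
  intro ks
  induction ks with
  | nil => intro d out _; simp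
  | cons k ks ih =>
    intro d out hinv
    obtain ⟨h1, h2, h3⟩ := cluster_step gt hgt d hinv (cd.getD k [])
    simp only [List.foldl_cons, List.map_cons]
    rw [ih _ _ h3]
    rw [h2, h1]
    simp

lemma foldl_append_map {α β : Type} (g : α → β) (l : List α) : ∀ out : List β,
    l.foldl (fun out x => out ++ [g x]) out = out ++ l.map g := by
  induction l with
  | nil => intro out; simp
  | cons x t ih => intro out; simp [ih]

lemma main_eq : ∀ (clusters : List (String × List String)) (ground_truth : List String),
    Pre_pages_covered clusters ground_truth →
    pages_covered clusters ground_truth = pages_covered_alt clusters ground_truth := by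
  intro clusters gt hpre
  by_cases hcl : clusters = []
  · subst hcl; rfl
  · have hgt : gt ≠ [] := hpre.resolve_left hcl
    have hinv : PySem.Set.update (PySem.Dict.empty : PySem.Dict String Int).keys gt
        = PySem.Set.ofList gt := rfl
    have h := loop_eq gt hgt (PySem.Dict.ofList clusters)
      ((PySem.Dict.ofList clusters).keys) PySem.Dict.empty [] hinv
    have hitems := PySem.Dict.items_eq_map_keys (PySem.Dict.ofList clusters)
      (PySem.Dict.nodup_keys_ofList clusters) []
    calc pages_covered clusters gt
        = ((PySem.Dict.ofList clusters).keys.foldl (fun (st : PySem.Dict String Int × List (String × String × Int × Int)) key =>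
            let tc0 := gt.foldl (fun d truth_class => d.insert truth_class 0) st.1
            let tc := ((PySem.Dict.ofList clusters).getD key []).foldl (fun d page_name =>
                (gt.find? (fun truth_class => PySem.Str.isIn truth_class page_name)).elim d
                  (fun truth_class => d.modify truth_class 0 (· + 1))) tc0
            let cls := key_with_max_val tc
            (tc, st.2 ++ [(key, cls, tc.getD cls 0, (((PySem.Dict.ofList clusters).getD key []).length : Int))]))
          (PySem.Dict.empty, [])).2 := rfl
      _ = pages_covered_alt clusters gt := by
          rw [h]
          rw [show pages_covered_alt clusters gt
              = ((PySem.Dict.ofList clusters).items).foldl (fun out kv =>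
                  out ++ [(kv.1,
                    (gt.foldl bstep (none, -1, kv.2)).1.getD "",
                    (gt.foldl bstep (none, -1, kv.2)).2.1,
                    (kv.2.length : Int))]) [] from rfl]
          rw [foldl_append_map]
          rw [hitems, List.map_map]
          simp only [List.nil_append]
          rfl

-- ===== VERDICT (by name: the statement is the Claim_ definition above) =====
theorem pages_covered_spec : Claim_equal_pages_covered := by
  intro clusters ground_truth _ hpre
  unfold Spec_pages_covered
  exact main_eq clusters ground_truth hpre
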